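-- pv_equiv track=rewrite | github.com/113bommy/codecontest_taco | variable_trace/python_gen_trace_added_data.py | track_final_changes
-- ===== SOURCE A (Python) =====
-- def track_final_changes(differences_list):
--     final_changes = {}
--
--     for differences in differences_list:
--         for key, change in differences.items():
--             if '->' in change:
--                 new_value = change.split('->')[-1].strip()
--                 final_changes[key] = new_value
--             else:
--                 final_changes[key] = change
--
--     return final_changes
-- ===== SOURCE B (Python) =====
-- def _finalize(v):
--     return v.split('->')[-1].strip() if '->' in v else v
--
--
-- def track_final_changes(differences_list):
--     # Flatten all (key, change) pairs in order.
--     pairs = [kv for d in differences_list for kv in d.items()]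
--     # Last change per key: scan the pairs backwards, first hit wins.
--     last = {}
--     for k, v in reversed(pairs):
--         if k not in last:
--             last[k] = v
--     # Output keys in first-occurrence order (matches dict insertion order).
--     order = dict.fromkeys(k for k, _ in pairs)
--     return {k: _finalize(last[k]) for k in order}
-- ===== Notes on version B (the rewrite author's own statement) =====
-- stated objective: alternative
-- what changed: B replaces A's fused insert-and-transform loop by three separate passes: flatten all (key, change) pairs, a backwards scan keeping the first hit per key (= the last change), and an output comprehension over the keys deduplicated in first-occurrence order via dict.fromkeys.
import Mathlib
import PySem

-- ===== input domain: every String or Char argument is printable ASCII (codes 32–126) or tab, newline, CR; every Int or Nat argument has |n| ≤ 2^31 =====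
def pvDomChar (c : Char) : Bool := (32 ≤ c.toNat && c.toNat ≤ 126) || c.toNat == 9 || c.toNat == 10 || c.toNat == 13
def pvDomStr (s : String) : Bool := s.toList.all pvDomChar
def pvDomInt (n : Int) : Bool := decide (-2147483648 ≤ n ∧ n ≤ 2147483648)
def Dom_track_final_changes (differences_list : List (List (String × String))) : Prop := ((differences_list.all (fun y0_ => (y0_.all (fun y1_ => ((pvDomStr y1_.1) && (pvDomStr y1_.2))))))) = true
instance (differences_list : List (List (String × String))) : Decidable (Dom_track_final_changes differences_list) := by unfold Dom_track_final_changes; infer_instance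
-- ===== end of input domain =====

-- B replaces A's fused insert loop by three passes: flatten the dicts' pairs, a reverse scan keeping the first hit per key (= last change), and an output pass over the keys deduped in first-occurrence order (alternative decomposition, same cost).


-- ===== PORT A =====
-- change.split('->')[-1].strip(); split? with a non-empty separator never returns none
-- and never an empty list, so the getD defaults are unreachable.
def tfcStep (d : PySem.Dict String String) (p : String × String) : PySem.Dict String String :=
  if PySem.Str.isIn "->" p.2 then
    d.insert p.1 (PySem.Str.strip ((((PySem.Str.split? p.2 "->").getD []).getLastD "")))
  else
    d.insert p.1 p.2

def track_final_changes (differences_list : List (List (String × String))) : List (String × String) :=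
  (differences_list.foldl (fun d differences => differences.foldl tfcStep d) PySem.Dict.empty).items

-- ===== PORT B =====
-- B's helper _finalize(v)
def tfcFinalize (v : String) : String :=
  if PySem.Str.isIn "->" v then
    PySem.Str.strip ((((PySem.Str.split? v "->").getD []).getLastD ""))
  else v

def track_final_changes_alt (differences_list : List (List (String × String))) : List (String × String) :=
  let pairs := differences_list.flatten
  let last := pairs.reverse.foldl
    (fun d p => if d.contains p.1 then d else d.insert p.1 p.2) PySem.Dict.empty
  let order := PySem.List.dedup (pairs.map (·.1))
  -- last[k]: every k of order occurs in pairs, hence in last — the KeyError default "" is unreachable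
  (order.foldl (fun d k => d.insert k (tfcFinalize ((last.get? k).getD ""))) PySem.Dict.empty).items

-- ===== PRECONDITION & SPEC =====
def Spec_track_final_changes (differences_list : List (List (String × String))) (out : List (String × String)) : Prop := out = track_final_changes_alt differences_list
instance (differences_list : List (List (String × String))) (out : List (String × String)) : Decidable (Spec_track_final_changes differences_list out) := by unfold Spec_track_final_changes; infer_instance

-- ===== CLAIM (what is proved, stated in full; the proofs are below) =====
def Claim_equal_track_final_changes : Prop := ∀ (differences_list : List (List (String × String))), Dom_track_final_changes differences_list → Spec_track_final_changes differences_list (track_final_changes differences_list)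

-- ===== LEMMAS AND PROOFS =====

-- the last value stored at key k by the pair list
def tfcLastVal (pairs : List (String × String)) (k : String) : Option String :=
  (pairs.reverse.find? (fun p => p.1 == k)).map (·.2)

theorem tfcStep_eq_insert (d : PySem.Dict String String) (p : String × String) :
    tfcStep d p = d.insert p.1 (tfcFinalize p.2) := by
  unfold tfcStep tfcFinalize
  split <;> rfl

theorem tfcStep_funext :
    tfcStep = fun (d : PySem.Dict String String) p => d.insert p.1 (tfcFinalize p.2) :=
  funext fun d => funext fun p => tfcStep_eq_insert d p

-- A's dict lookup: the last occurrence wins, finalized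
theorem tfcA_get (pairs : List (String × String)) (d : PySem.Dict String String) (k : String) :
    (pairs.foldl (fun d p => d.insert p.1 (tfcFinalize p.2)) d).get? k
      = ((tfcLastVal pairs k).map tfcFinalize).or (d.get? k) := by
  induction pairs generalizing d with
  | nil => simp [tfcLastVal]
  | cons p t ih =>
    simp only [List.foldl_cons, ih, tfcLastVal, List.reverse_cons, List.find?_append]
    cases hft : t.reverse.find? (fun q => q.1 == k) with
    | some v => simp
    | none =>
      by_cases hk : p.1 = k
      · subst hk
        simp [PySem.Dict.get?_insert_self]
      · have hb : (p.1 == k) = false := by simpa using hk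
        simp [List.find?, hb, PySem.Dict.get?_insert_of_ne _ _ (Ne.symm hk)]

-- B's `last` dict lookup: first hit of the scanned list wins
theorem tfcB_last_get (l : List (String × String)) (d : PySem.Dict String String) (k : String) :
    (l.foldl (fun d p => if d.contains p.1 then d else d.insert p.1 p.2) d).get? k
      = (d.get? k).or ((l.find? (fun p => p.1 == k)).map (·.2)) := by
  induction l generalizing d with
  | nil => simp
  | cons p t ih =>
    simp only [List.foldl_cons, ih]
    by_cases hk : p.1 = k
    · subst hk
      by_cases hc : d.contains p.1 = true
      · have hs : (d.get? p.1).isSome := by rw [← PySem.Dict.contains_eq_isSome_get?]; exact hc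
        obtain ⟨x, hx⟩ := Option.isSome_iff_exists.mp hs
        simp [hc, List.find?, hx]
      · have hnone : d.get? p.1 = none := by
          rw [PySem.Dict.get?_eq_none_iff_contains]
          simpa using hc
        simp [hc, hnone, List.find?, PySem.Dict.get?_insert_self]
    · have hb : (p.1 == k) = false := by simpa using hk
      by_cases hc : d.contains p.1 = true
      · simp [hc, List.find?, hb]
      · simp [hc, List.find?, hb, PySem.Dict.get?_insert_of_ne _ _ (Ne.symm hk)]

-- ===== VERDICT (by name: the statement is the Claim_ definition above) =====
theorem track_final_changes_spec : Claim_equal_track_final_changes := by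
  intro l _
  show track_final_changes l = track_final_changes_alt l
  unfold track_final_changes track_final_changes_alt
  rw [tfcStep_funext]
  simp only []
  -- A: fold over the nested lists is the fold over the flattened pairs
  rw [← List.foldl_flatten]
  set pairs := l.flatten with hpairs
  -- A's items are its (deduped, in-order) keys paired with their final values
  have hnd : (pairs.foldl (fun d p => d.insert p.1 (tfcFinalize p.2)) PySem.Dict.empty).keys.Nodup := by
    exact PySem.Dict.nodup_keys_foldl_insert_key pairs (·.1) (fun _ p => tfcFinalize p.2)
      PySem.Dict.empty (by simp)
  have hkeys : (pairs.foldl (fun d p => d.insert p.1 (tfcFinalize p.2)) PySem.Dict.empty).keys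
      = PySem.List.dedup (pairs.map (·.1)) := by
    rw [PySem.Dict.keys_foldl_insert_key pairs (·.1) (fun _ p => tfcFinalize p.2) PySem.Dict.empty]
    simp [PySem.List.dedup_eq_ofList, PySem.Set.update, PySem.Set.ofList_eq_foldl]
  rw [PySem.Dict.items_eq_map_keys _ hnd "", hkeys]
  -- B: inserting along distinct fresh keys appends
  have hBitems := PySem.Dict.items_foldl_insert_fresh
      (PySem.List.dedup (pairs.map (·.1))) (fun a => a)
      (fun k => tfcFinalize (((pairs.reverse.foldl
        (fun d p => if d.contains p.1 then d else d.insert p.1 p.2) PySem.Dict.empty).get? k).getD ""))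
      PySem.Dict.empty
      (by intro a _; simp) (by simp)
  simp only [show (PySem.Dict.empty : PySem.Dict String String).items = [] from rfl, List.nil_append] at hBitems
  rw [hBitems]
  apply List.map_congr_left
  intro k hk
  have hkmem : k ∈ pairs.map (·.1) := (PySem.List.mem_dedup _ _).mp hk
  have hsome : (pairs.reverse.find? (fun p => p.1 == k)).isSome := by
    rw [List.find?_isSome]
    obtain ⟨p, hp, hpk⟩ := List.mem_map.mp hkmem
    exact ⟨p, List.mem_reverse.mpr hp, by simpa using hpk⟩
  obtain ⟨q, hq⟩ := Option.isSome_iff_exists.mp hsome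
  have hlv : tfcLastVal pairs k = some q.2 := by simp [tfcLastVal, hq]
  have hA := tfcA_get pairs PySem.Dict.empty k
  rw [hlv] at hA
  have hB := tfcB_last_get pairs.reverse PySem.Dict.empty k
  rw [show pairs.reverse.find? (fun p => p.1 == k) = some q from hq] at hB
  simp only [PySem.Dict.get?_empty, Option.or_none, Option.map_some, Option.none_or] at hA hB
  rw [PySem.Dict.getD_eq_get?_getD, hA, hB]
  simp
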